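-- pv_equiv track=rewrite | github.com/wwdproject/wwdproject002 | step1_2.py | findeng
-- ===== SOURCE A (Python) =====
-- import string
--
-- letters=string.ascii_lowercase+string.ascii_uppercase+'-'+'_'+'0123456789'
--
-- letters2=letters+' '
--
-- def findeng(project_txt):
--     #找到中文摘要里英文专有名词
--     lenth=len(project_txt)
--     word_engs=[]
--     i=0
--     while(i<lenth):
--         if(project_txt[i] in letters):
--             word_english=''
--             while( i<lenth and project_txt[i] in letters2):
--                 word_english+=project_txt[i]
--                 i=i+1
--             word_english=word_english.strip()
--             if(len(word_english)!=1):
--                 word_engs.append(word_english)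
--         i=i+1
--     return list(set(word_engs))
-- ===== SOURCE B (Python) =====
-- import string
--
-- _WORD = frozenset(string.ascii_lowercase + string.ascii_uppercase + '-' + '_' + '0123456789' + ' ')
--
-- def findeng(project_txt):
--     # Stage 1: mask every non-word character with a newline delimiter.
--     masked = ''.join(ch if ch in _WORD else '\n' for ch in project_txt)
--     # Stage 2: split on the delimiter, strip each token, keep tokens of length >= 2, dedupe.
--     return list({w for t in masked.split('\n') for w in (t.strip(),) if len(w) >= 2})
-- ===== Notes on version B (the rewrite author's own statement) =====
-- stated objective: faster
-- what changed: A's single index/while pointer scan that grows each token with += is replaced by a staged pipeline: first mask every non-word character with a newline delimiter, then split the masked text on that delimiter, then strip/length-filter the tokens into a set.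
import Mathlib
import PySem

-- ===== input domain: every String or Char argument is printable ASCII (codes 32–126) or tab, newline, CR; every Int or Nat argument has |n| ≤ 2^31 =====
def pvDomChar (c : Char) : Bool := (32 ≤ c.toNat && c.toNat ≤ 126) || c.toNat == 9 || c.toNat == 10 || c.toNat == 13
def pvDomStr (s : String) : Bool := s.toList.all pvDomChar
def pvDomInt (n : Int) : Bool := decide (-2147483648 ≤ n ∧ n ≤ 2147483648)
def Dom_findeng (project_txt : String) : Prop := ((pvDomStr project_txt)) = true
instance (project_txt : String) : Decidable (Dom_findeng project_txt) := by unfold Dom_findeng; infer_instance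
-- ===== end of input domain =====

-- B replaces A's index/while pointer scan by a staged pipeline: mask every non-word
-- character with a newline delimiter, split on the delimiter, strip/length-filter the
-- tokens into a set (alternative decomposition).
-- A's `list(set(...))` is ported as PySem.Set.ofList (first-occurrence order); outputs are
-- compared as sets.

-- ===== PORT A =====
-- letters = ascii_lowercase + ascii_uppercase + '-' + '_' + '0123456789'
-- written as a literal char list (the same characters; String.toList on a long literal is too deep for kernel evaluation)
def lettersA : List Char :=
  ['a', 'b', 'c', 'd', 'e', 'f', 'g', 'h', 'i', 'j', 'k', 'l', 'm', 'n', 'o', 'p', 'q', 'r', 's', 't', 'u', 'v', 'w', 'x', 'y', 'z', 'A', 'B', 'C', 'D', 'E', 'F', 'G', 'H', 'I', 'J', 'K', 'L', 'M', 'N', 'O', 'P', 'Q', 'R', 'S', 'T', 'U', 'V', 'W', 'X', 'Y', 'Z',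
   '-', '_', '0', '1', '2', '3', '4', '5', '6', '7', '8', '9']
-- letters2 = letters + ' '
def letters2A : List Char := lettersA ++ [' ']

-- inner while: 'while i<lenth and project_txt[i] in letters2: word_english += project_txt[i]; i += 1'
-- ('ch in letters2' on a single char is char membership; the word is kept as List Char)
def consumeA (cs : List Char) (i : Nat) (w : List Char) : List Char × Nat :=
  if h : i < cs.length then
    if letters2A.contains cs[i] then consumeA cs (i + 1) (w ++ [cs[i]])
    else (w, i)
  else (w, i)
termination_by cs.length - i
decreasing_by omega

-- termination helper for the outer loop: the inner scan never moves the index backwards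
theorem consumeA_ge (cs : List Char) (i : Nat) (w : List Char) : i ≤ (consumeA cs i w).2 := by
  fun_induction consumeA with
  | case1 h hc ih => omega
  | case2 h hc => simp
  | case3 h => simp

-- outer while over the index i, accumulating word_engs
def mainA (cs : List Char) (i : Nat) (acc : List (List Char)) : List (List Char) :=
  if h : i < cs.length then
    if lettersA.contains cs[i] then
      mainA cs ((consumeA cs i []).2 + 1)
        (if (PySem.Chars.strip (consumeA cs i []).1).length ≠ 1
         then acc ++ [PySem.Chars.strip (consumeA cs i []).1] else acc)
    else mainA cs (i + 1) acc
  else acc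
termination_by cs.length - i
decreasing_by
  · have := consumeA_ge cs i []
    omega
  · omega

def findeng (project_txt : String) : List String :=
  PySem.Set.ofList ((mainA project_txt.toList 0 []).map String.ofList)

-- ===== PORT B =====
-- _WORD = frozenset(ascii_lowercase + ascii_uppercase + '-' + '_' + '0123456789' + ' ')
def wordB : List Char :=
  ['a', 'b', 'c', 'd', 'e', 'f', 'g', 'h', 'i', 'j', 'k', 'l', 'm', 'n', 'o', 'p', 'q', 'r', 's', 't', 'u', 'v', 'w', 'x', 'y', 'z', 'A', 'B', 'C', 'D', 'E', 'F', 'G', 'H', 'I', 'J', 'K', 'L', 'M', 'N', 'O', 'P', 'Q', 'R', 'S', 'T', 'U', 'V', 'W', 'X', 'Y', 'Z',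
   '-', '_', '0', '1', '2', '3', '4', '5', '6', '7', '8', '9', ' ']

-- Stage 1: ''.join(ch if ch in _WORD else '\n' for ch in project_txt)
def maskB (c : Char) : Char := if wordB.contains c then c else '\n'

-- Stage 2a: masked.split('\n') — Python str.split with an explicit separator (keeps empty pieces)
def splitNL (l : List Char) : List (List Char) :=
  match l with
  | [] => [[]]
  | c :: rest =>
    if c = '\n' then [] :: splitNL rest
    else
      match splitNL rest with
      | [] => [[c]]   -- unreachable: splitNL never returns []
      | t :: ts => (c :: t) :: ts

-- Stage 2b: the comprehension body — strip the token, keep it iff len >= 2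
def keepB (t : List Char) : Option String :=
  let w := PySem.Chars.strip t
  if 2 ≤ w.length then some (String.ofList w) else none

def findeng_alt (project_txt : String) : List String :=
  PySem.Set.ofList ((splitNL (project_txt.toList.map maskB)).filterMap keepB)

-- ===== PRECONDITION & SPEC =====
def Spec_findeng (project_txt : String) (out : List String) : Prop := out = findeng_alt project_txt
instance (project_txt : String) (out : List String) : Decidable (Spec_findeng project_txt out) := by unfold Spec_findeng; infer_instance

-- ===== CLAIM (what is proved, stated in full; the proofs are below) =====
def Claim_equal_findeng : Prop := ∀ (project_txt : String), Dom_findeng project_txt → Spec_findeng project_txt (findeng project_txt)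

-- ===== LEMMAS AND PROOFS =====

-- proof-side middle form: the run decomposition both ports are reduced to
def altGo (l : List Char) : List (List Char) :=
  match l with
  | [] => []
  | c :: rest =>
    if letters2A.contains c then
      let w := PySem.Chars.strip (c :: rest.takeWhile letters2A.contains)
      (if 2 ≤ w.length then [w] else []) ++ altGo (rest.dropWhile letters2A.contains)
    else altGo (rest.dropWhile (fun d => !letters2A.contains d))
termination_by l.length
decreasing_by
  all_goals simp only [List.length_cons]
  all_goals exact Nat.lt_succ_of_le (List.length_dropWhile_le _ rest)

-- B's word set is A's letters2
theorem wordB_eq : wordB = letters2A := by decide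

-- character-class facts about the two literal alphabets
theorem mem_letters2_of_mem_letters (c : Char) (h : lettersA.contains c = true) :
    letters2A.contains c = true := by
  have hm : c ∈ lettersA := by simpa using h
  simp [letters2A]
  simp at hm
  exact Or.inl hm

theorem eq_space_of_mem_letters2_not_letters (c : Char) (h2 : letters2A.contains c = true)
    (h1 : lettersA.contains c = false) : c = ' ' := by
  have hm : c ∈ lettersA ++ [' '] := by simpa [letters2A] using h2
  rcases List.mem_append.mp hm with hL | hS
  · exfalso
    have : lettersA.contains c = true := by simpa using hL
    rw [h1] at this; cases this
  · simpa using hS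

theorem not_isspace_of_mem_letters (c : Char) (hc : c ∈ lettersA) :
    PySem.Chars.isspace c = false := by
  have h : lettersA.all (fun c => !PySem.Chars.isspace c) = true := by decide
  simpa using List.all_eq_true.mp h c hc

theorem ne_newline_of_word (c : Char) (hc : letters2A.contains c = true) : c ≠ '\n' := by
  have h : letters2A.all (fun c => c ≠ '\n') = true := by decide
  have hm : c ∈ letters2A := by simpa using hc
  simpa using List.all_eq_true.mp h c hm

-- unfolding equations for altGo
theorem altGo_cons_pos (c : Char) (rest : List Char) (hc : letters2A.contains c = true) :
    altGo (c :: rest) =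
      (if 2 ≤ (PySem.Chars.strip (c :: rest.takeWhile letters2A.contains)).length then
        [PySem.Chars.strip (c :: rest.takeWhile letters2A.contains)] else []) ++
      altGo (rest.dropWhile letters2A.contains) := by
  rw [altGo, if_pos hc]

theorem altGo_cons_neg (c : Char) (rest : List Char) (hc : letters2A.contains c = false) :
    altGo (c :: rest) = altGo (rest.dropWhile (fun d => !letters2A.contains d)) := by
  rw [altGo, if_neg (by rw [hc]; simp)]

-- the inner while loop takes exactly the maximal letters2-run starting at i
theorem consumeA_spec (cs : List Char) (i : Nat) (w : List Char) : consumeA cs i w =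
    (w ++ (cs.drop i).takeWhile letters2A.contains,
     i + ((cs.drop i).takeWhile letters2A.contains).length) := by
  fun_induction consumeA with
  | case1 i w h hc ih =>
    rw [ih, ← List.getElem_cons_drop h, List.takeWhile_cons_of_pos hc]
    simp only [Prod.mk.injEq, List.append_assoc, List.singleton_append, List.length_cons]
    exact ⟨trivial, by omega⟩
  | case2 i w h hc =>
    rw [← List.getElem_cons_drop h, List.takeWhile_cons_of_neg hc]
    simp
  | case3 i w h =>
    rw [List.drop_eq_nil_of_le (by omega)]
    simp

-- stripping ignores a leading space
theorem strip_space_cons (xs : List Char) : PySem.Chars.strip (' ' :: xs) = PySem.Chars.strip xs := by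
  rw [PySem.Chars.strip, PySem.Chars.strip, PySem.Chars.lstrip, PySem.Chars.lstrip,
    List.dropWhile_cons_of_pos (by decide)]

-- a run starting with a non-space character strips to something nonempty
theorem strip_len_pos (c : Char) (xs : List Char) (hc : PySem.Chars.isspace c = false) :
    1 ≤ (PySem.Chars.strip (c :: xs)).length := by
  have h1 : PySem.Chars.lstrip (c :: xs) = c :: xs := by
    rw [PySem.Chars.lstrip, List.dropWhile_cons_of_neg (by rw [hc]; simp)]
  rw [PySem.Chars.strip, h1, PySem.Chars.rstrip]
  cases hq : List.dropWhile PySem.Chars.isspace (c :: xs).reverse with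
  | nil =>
    exfalso
    have hall := List.dropWhile_eq_nil_iff.mp hq
    have := hall c (by simp)
    rw [hc] at this; cases this
  | cons a l => simp

-- skipping a non-word run does not change altGo's result
theorem altGo_dropNot : ∀ t : List Char, altGo (t.dropWhile (fun d => !letters2A.contains d)) = altGo t := by
  intro t
  induction t with
  | nil => simp
  | cons c rest ih =>
    by_cases hc : letters2A.contains c = true
    · rw [List.dropWhile_cons_of_neg (by rw [hc]; simp)]
    · have hc' : letters2A.contains c = false := by simpa using hc
      rw [List.dropWhile_cons_of_pos (by rw [hc']; simp), altGo_cons_neg c rest hc', ih]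

-- the head of a dropWhile result fails the predicate
theorem head_dropWhile_neg {α : Type} (p : α → Bool) : ∀ (l : List α) c t,
    l.dropWhile p = c :: t → p c = false := by
  intro l
  induction l with
  | nil => intro c t h; simp at h
  | cons a l ih =>
    intro c t h
    by_cases ha : p a = true
    · rw [List.dropWhile_cons_of_pos ha] at h; exact ih c t h
    · rw [List.dropWhile_cons_of_neg ha] at h
      cases h; simpa using ha

-- altGo ignores a leading space
theorem altGo_space (t : List Char) : altGo (' ' :: t) = altGo t := by
  cases t with
  | nil =>
    rw [altGo_cons_pos ' ' [] (by decide)]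
    have h0 : altGo ([] : List Char) = [] := by rw [altGo]
    simp [h0, show PySem.Chars.strip [' '] = [] from by decide]
  | cons d t' =>
    by_cases hd : letters2A.contains d = true
    · rw [altGo_cons_pos ' ' (d :: t') (by decide),
        List.takeWhile_cons_of_pos hd, List.dropWhile_cons_of_pos hd,
        altGo_cons_pos d t' hd, strip_space_cons]
    · have hd' : letters2A.contains d = false := by simpa using hd
      rw [altGo_cons_pos ' ' (d :: t') (by decide),
        List.takeWhile_cons_of_neg (by rw [hd']; simp), List.dropWhile_cons_of_neg (by rw [hd']; simp)]
      simp [show PySem.Chars.strip [' '] = [] from by decide, altGo_cons_neg d t' hd']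

-- dropWhile as a drop
theorem dropWhile_eq_drop {α : Type} (p : α → Bool) : ∀ l : List α,
    l.dropWhile p = l.drop (l.takeWhile p).length := by
  intro l
  induction l with
  | nil => rfl
  | cons a l ih =>
    by_cases ha : p a = true
    · rw [List.dropWhile_cons_of_pos ha, List.takeWhile_cons_of_pos ha, ih]
      simp
    · rw [List.dropWhile_cons_of_neg ha, List.takeWhile_cons_of_neg (by simpa using ha)]
      simp

-- dropping past a word run lands one past a non-word character (or the end)
theorem altGo_after (t : List Char) :
    altGo ((t.dropWhile letters2A.contains).drop 1) = altGo (t.dropWhile letters2A.contains) := by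
  cases hq : t.dropWhile letters2A.contains with
  | nil => simp
  | cons c' t'' =>
    have hc' : letters2A.contains c' = false := head_dropWhile_neg _ t c' t'' hq
    rw [List.drop_one, List.tail_cons, altGo_cons_neg c' t'' hc', altGo_dropNot]

-- the outer while equals the run-based middle form
theorem main_eq_alt (cs : List Char) (i : Nat) (acc : List (List Char)) :
    mainA cs i acc = acc ++ altGo (cs.drop i) := by
  fun_induction mainA with
  | case1 i acc h hq ih =>
    simp only [dite_eq_ite] at ih
    rw [consumeA_spec, List.nil_append] at ih ⊢
    have hcl : cs[i] ∈ lettersA := by simpa using hq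
    have hp2 : letters2A.contains cs[i] = true := mem_letters2_of_mem_letters _ hq
    have hdrop : cs.drop i = cs[i] :: cs.drop (i + 1) := (List.getElem_cons_drop h).symm
    rw [hdrop, List.takeWhile_cons_of_pos hp2] at ih ⊢
    set t := cs.drop (i + 1) with ht
    set w := PySem.Chars.strip (cs[i] :: t.takeWhile letters2A.contains) with hw
    have hw1 : 1 ≤ w.length :=
      strip_len_pos _ _ (not_isspace_of_mem_letters _ hcl)
    have hifeq : (if w.length ≠ 1 then acc ++ [w] else acc)
        = acc ++ (if 2 ≤ w.length then [w] else []) := by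
      rcases Nat.lt_or_ge w.length 2 with hlt | hge
      · have h1 : w.length = 1 := by omega
        simp [h1]
      · have h1 : w.length ≠ 1 := by omega
        simp [h1, hge]
    simp only [List.length_cons] at ih ⊢
    have hsuf : cs.drop (i + ((t.takeWhile letters2A.contains).length + 1) + 1)
        = (t.dropWhile letters2A.contains).drop 1 := by
      rw [dropWhile_eq_drop, ht, List.drop_drop, List.drop_drop]
      congr 1
      omega
    rw [ih, hifeq, hsuf, altGo_after, altGo_cons_pos _ _ hp2, ← hw, List.append_assoc]
  | case2 i acc h hq ih =>
    have hdrop : cs.drop i = cs[i] :: cs.drop (i + 1) := (List.getElem_cons_drop h).symm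
    by_cases hp2 : letters2A.contains cs[i] = true
    · have hsp : cs[i] = ' ' := eq_space_of_mem_letters2_not_letters _ hp2 (by simpa using hq)
      rw [ih, hdrop, hsp, altGo_space]
    · have hp2' : letters2A.contains cs[i] = false := by simpa using hp2
      rw [ih, hdrop, altGo_cons_neg _ _ hp2', altGo_dropNot]
  | case3 i acc h =>
    rw [List.drop_eq_nil_of_le (by omega), altGo]
    simp

-- ===== B-side reduction: the mask/split/filter pipeline equals the run-based middle form =====

-- splitNL never returns the empty list
theorem splitNL_ne_nil (l : List Char) : splitNL l ≠ [] := by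
  cases l with
  | nil => simp [splitNL]
  | cons c rest =>
    rw [splitNL]
    by_cases hc : c = '\n'
    · simp [hc]
    · rw [if_neg hc]
      cases splitNL rest <;> simp

-- prepending a masked word run extends the first token of the split
theorem splitNL_word_prefix : ∀ (r l : List Char) (t : List Char) (ts : List (List Char)),
    (∀ x ∈ r, letters2A.contains x = true) → splitNL l = t :: ts →
    splitNL (r.map maskB ++ l) = (r ++ t) :: ts := by
  intro r
  induction r with
  | nil => intro l t ts _ h; simpa using h
  | cons a r' ih =>
    intro l t ts hall h
    have ha : letters2A.contains a = true := hall a (by simp)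
    have hmask : maskB a = a := by
      rw [maskB, wordB_eq, if_pos ha]
    have hne : a ≠ '\n' := ne_newline_of_word a ha
    rw [List.map_cons, hmask, List.cons_append, splitNL, if_neg hne,
      ih l t ts (fun x hx => hall x (by simp [hx])) h]
    rfl

-- filterMap keepB drops an empty token
theorem keepB_nil : keepB [] = none := by decide

-- the pipeline ignores a leading non-word run
theorem pipeline_dropNot : ∀ l : List Char,
    (splitNL ((l.dropWhile (fun d => !letters2A.contains d)).map maskB)).filterMap keepB
      = (splitNL (l.map maskB)).filterMap keepB := by
  intro l
  induction l with
  | nil => simp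
  | cons c rest ih =>
    by_cases hc : letters2A.contains c = true
    · rw [List.dropWhile_cons_of_neg (by rw [hc]; simp)]
    · have hc' : letters2A.contains c = false := by simpa using hc
      have hmask : maskB c = '\n' := by rw [maskB, wordB_eq, if_neg (by rw [hc']; simp)]
      rw [List.dropWhile_cons_of_pos (by rw [hc']; simp), ih, List.map_cons, hmask, splitNL,
        if_pos rfl, List.filterMap_cons, keepB_nil]

-- the staged pipeline equals the run-based middle form (tokens mapped to strings)
theorem pipeline_eq_alt : ∀ cs : List Char,
    (splitNL (cs.map maskB)).filterMap keepB = (altGo cs).map String.ofList := by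
  intro cs
  fun_induction altGo with
  | case1 => simp [splitNL, keepB_nil]
  | case2 c rest hc w ih =>
    -- word-run case: the first token of the split is exactly the run
    have hsplit : rest = rest.takeWhile letters2A.contains ++ rest.dropWhile letters2A.contains :=
      (List.takeWhile_append_dropWhile).symm
    obtain ⟨t0, ts0, hts⟩ :
        ∃ t0 ts0, splitNL ((rest.dropWhile letters2A.contains).map maskB) = t0 :: ts0 := by
      cases h : splitNL ((rest.dropWhile letters2A.contains).map maskB) with
      | nil => exact absurd h (splitNL_ne_nil _)
      | cons a b => exact ⟨a, b, rfl⟩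
    -- the first token after the run is empty (end of text or a masked delimiter)
    have ht0 : t0 = [] := by
      cases hq : rest.dropWhile letters2A.contains with
      | nil =>
        rw [hq] at hts; simp [splitNL] at hts
        exact hts.1
      | cons d u =>
        have hd : letters2A.contains d = false := head_dropWhile_neg _ rest d u hq
        have hmask : maskB d = '\n' := by rw [maskB, wordB_eq, if_neg (by rw [hd]; simp)]
        rw [hq, List.map_cons, hmask, splitNL, if_pos rfl] at hts
        injection hts with h1 _
        exact h1.symm
    have hall : ∀ x ∈ c :: rest.takeWhile letters2A.contains, letters2A.contains x = true := by
      intro x hx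
      rcases List.mem_cons.mp hx with h | h
      · rw [h]; exact hc
      · exact List.mem_takeWhile_imp h
    have hsplitfull : splitNL ((c :: rest).map maskB)
        = ((c :: rest.takeWhile letters2A.contains) ++ t0) :: ts0 := by
      have hmm : (c :: rest).map maskB
          = (c :: rest.takeWhile letters2A.contains).map maskB
            ++ (rest.dropWhile letters2A.contains).map maskB := by
        conv_lhs => rw [hsplit]
        rw [List.map_cons, List.map_append, List.map_cons, List.cons_append]
      rw [hmm]
      exact splitNL_word_prefix _ _ t0 ts0 hall hts
    -- the tail of the split is what the recursive call processes
    have htail : ts0.filterMap keepB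
        = (altGo (rest.dropWhile letters2A.contains)).map String.ofList := by
      rw [← ih, hts, List.filterMap_cons, ht0, keepB_nil]
    rw [hsplitfull, ht0, List.append_nil, List.filterMap_cons, List.map_append, ← htail]
    by_cases h2 : 2 ≤ (PySem.Chars.strip (c :: rest.takeWhile letters2A.contains)).length
    · simp [keepB, h2, w]
    · simp [keepB, h2, w]
  | case3 c rest hc ih =>
    have hc' : letters2A.contains c = false := by simpa using hc
    have hmask : maskB c = '\n' := by rw [maskB, wordB_eq, if_neg (by rw [hc']; simp)]
    rw [← ih, pipeline_dropNot, List.map_cons, hmask, splitNL,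
      if_pos rfl, List.filterMap_cons, keepB_nil]

-- ===== VERDICT (by name: the statement is the Claim_ definition above) =====
theorem findeng_spec : Claim_equal_findeng := by
  intro s _
  unfold Spec_findeng findeng findeng_alt
  rw [main_eq_alt, pipeline_eq_alt]
  simp
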